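-- pv_equiv track=rewrite | github.com/mrkriodev/tc_hackaton | src/service/ai_analyze.py | extractTransfer
-- ===== SOURCE A (Python) =====
-- def extractTransfer(allStr):
--     '''
--     функция, чтобы достать искомой части из source_code
--     '''
--     str_in_array = allStr.split(sep='}', maxsplit=-1)
--     finalTransferFrom = str_in_array[0] + '}'
--     for i in range(1, len(str_in_array)):
--         if 'function' not in str_in_array[i]:
--             finalTransferFrom += str_in_array[i]
--             finalTransferFrom += '}'
--         else:
--             break
--     return finalTransferFrom
-- ===== SOURCE B (Python) =====
-- def extractTransfer(allStr):
--     p0 = allStr.find('}')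
--     if p0 == -1:
--         return allStr + '}'
--     idx = allStr.find('function', p0 + 1)
--     if idx == -1:
--         return allStr + '}'
--     return allStr[: allStr.rfind('}', 0, idx) + 1]
-- ===== Notes on version B (the rewrite author's own statement) =====
-- stated objective: idiomatic
-- what changed: Replaces split-on-'}' plus a segment loop by direct index arithmetic: find the first '}', find the first 'function' after it, and return one slice up to the last '}' before that match (or allStr+'}' when absent).
import Mathlib
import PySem

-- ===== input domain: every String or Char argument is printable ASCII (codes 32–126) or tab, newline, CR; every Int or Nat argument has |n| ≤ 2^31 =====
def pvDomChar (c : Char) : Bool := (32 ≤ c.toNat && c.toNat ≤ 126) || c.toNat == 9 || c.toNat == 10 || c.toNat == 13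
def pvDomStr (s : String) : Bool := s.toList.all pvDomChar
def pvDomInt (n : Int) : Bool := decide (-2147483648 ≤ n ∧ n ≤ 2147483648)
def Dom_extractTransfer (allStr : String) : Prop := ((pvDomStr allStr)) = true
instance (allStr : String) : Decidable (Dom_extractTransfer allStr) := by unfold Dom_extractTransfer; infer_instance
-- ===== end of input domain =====

-- B replaces A's split-on-'}' segment loop by direct string-index arithmetic (find / rfind / one slice); same result, proved equal on all inputs.


-- ===== PORT A =====
-- helper: the 'for i in range(1, len(str_in_array)): … break' loop, as structural recursion over the tail
def extractTransferLoop (parts : List (List Char)) (acc : List Char) : List Char :=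
  match parts with
  | [] => acc
  | s :: rest =>
    if PySem.Chars.isIn "function".toList s = false then
      extractTransferLoop rest (acc ++ s ++ ['}'])
    else acc

def extractTransfer (allStr : String) : String :=
  let strInArray := (PySem.Chars.splitMax? allStr.toList "}".toList (-1)).getD []
  let finalTransferFrom := PySem.List.pyGetD strInArray 0 [] ++ ['}']
  String.ofList (extractTransferLoop (strInArray.drop 1) finalTransferFrom)

-- ===== PORT B =====
def extractTransfer_alt (allStr : String) : String :=
  let cs := allStr.toList
  let p0 := PySem.Chars.find cs "}".toList
  if p0 = -1 then String.ofList (cs ++ "}".toList)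
  else
    let idx := PySem.Chars.findFrom cs "function".toList (p0 + 1) none
    if idx = -1 then String.ofList (cs ++ "}".toList)
    else
      let cut := PySem.Chars.rfindFrom cs "}".toList 0 (some idx)
      String.ofList (PySem.Chars.slice cs none (some (cut + 1)))

-- ===== PRECONDITION & SPEC =====
def Spec_extractTransfer (allStr : String) (out : String) : Prop := out = extractTransfer_alt allStr
instance (allStr : String) (out : String) : Decidable (Spec_extractTransfer allStr out) := by unfold Spec_extractTransfer; infer_instance

-- ===== CLAIM (what is proved, stated in full; the proofs are below) =====
def Claim_equal_extractTransfer : Prop := ∀ (allStr : String), Dom_extractTransfer allStr → Spec_extractTransfer allStr (extractTransfer allStr)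

-- ===== LEMMAS AND PROOFS =====

def pvSplit : List Char → List (List Char)
  | [] => [[]]
  | c :: rest =>
    if c = '}' then [] :: pvSplit rest
    else
      match pvSplit rest with
      | [] => [[c]]
      | p :: ps => (c :: p) :: ps
def pvConsAll (pre : List Char) : List (List Char) → List (List Char)
  | [] => [pre]
  | p :: ps => (pre ++ p) :: ps
theorem pvSplit_ne_nil (cs : List Char) : pvSplit cs ≠ [] := by
  cases cs with
  | nil => simp [pvSplit]
  | cons c rest => simp only [pvSplit]; split; · simp
                   · split <;> simp
theorem pvConsAll_consAll (a b : List Char) (xs : List (List Char)) :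
    pvConsAll a (pvConsAll b xs) = pvConsAll (a ++ b) xs := by
  cases xs <;> simp [pvConsAll]
theorem pvSplit_cons_ne (c : Char) (rest : List Char) (h : c ≠ '}') :
    pvSplit (c :: rest) = pvConsAll [c] (pvSplit rest) := by
  simp only [pvSplit, if_neg h]
  cases hr : pvSplit rest <;> simp [pvConsAll]

theorem pvSplit_go (fuel : Nat) : ∀ (l cur : List Char) (acc : List (List Char)),
    l.length < fuel →
    PySem.Chars.splitOn.go ['}'] fuel l cur acc =
      acc.reverse ++ pvConsAll cur.reverse (pvSplit l) := by
  induction fuel with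
  | zero => intro l cur acc h; omega
  | succ f ih =>
    intro l cur acc h
    cases l with
    | nil =>
      rw [PySem.Chars.splitOn.go]
      simp [pvSplit, pvConsAll]
      omega
    | cons c rest =>
      rw [PySem.Chars.splitOn.go]
      by_cases hc : c = '}'
      · subst hc
        have hpre : List.isPrefixOf ['}'] ('}' :: rest) = true := by simp [List.isPrefixOf]
        simp only [hpre, if_pos]
        have hd : List.drop (['}'] : List Char).length ('}' :: rest) = rest := by simp
        rw [hd, ih rest [] (cur.reverse :: acc) (by simp at h ⊢; omega)]
        simp only [pvSplit, if_pos]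
        cases hr : pvSplit rest with
        | nil => exact absurd hr (pvSplit_ne_nil rest)
        | cons p ps => simp [pvConsAll]
      · have hpre : List.isPrefixOf ['}'] (c :: rest) = false := by
          simp [List.isPrefixOf]; exact fun hh => (hc hh.symm).elim
        simp only [hpre, Bool.false_eq_true, if_false]
        rw [ih rest (c :: cur) acc (by simp at h ⊢; omega)]
        rw [pvSplit_cons_ne c rest hc, pvConsAll_consAll]
        simp

theorem splitOn_eq_pvSplit (cs : List Char) :
    PySem.Chars.splitOn cs ['}'] = pvSplit cs := by
  rw [PySem.Chars.splitOn, pvSplit_go (cs.length + 1) cs [] [] (by omega)]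
  cases h : pvSplit cs with
  | nil => exact absurd h (pvSplit_ne_nil cs)
  | cons p ps => simp [pvConsAll]

theorem pvSplit_nobrace (cs : List Char) (h : '}' ∉ cs) : pvSplit cs = [cs] := by
  induction cs with
  | nil => rfl
  | cons c rest ih =>
    have hc : c ≠ '}' := fun hh => h (hh ▸ List.mem_cons_self ..)
    rw [pvSplit_cons_ne c rest hc, ih (fun hh => h (List.mem_cons_of_mem _ hh))]
    rfl

theorem pvSplit_brace (a r : List Char) (ha : '}' ∉ a) :
    pvSplit (a ++ '}' :: r) = a :: pvSplit r := by
  induction a with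
  | nil => simp [pvSplit]
  | cons c a' ih =>
    have hc : c ≠ '}' := fun hh => ha (hh ▸ List.mem_cons_self ..)
    rw [List.cons_append, pvSplit_cons_ne c _ hc, ih (fun hh => ha (List.mem_cons_of_mem _ hh))]
    rfl


theorem loop_acc (parts : List (List Char)) : ∀ (acc : List Char),
    extractTransferLoop parts acc = acc ++ extractTransferLoop parts [] := by
  induction parts with
  | nil => intro acc; simp [extractTransferLoop]
  | cons s rest ih =>
    intro acc
    simp only [extractTransferLoop]
    split
    · rw [ih (acc ++ s ++ ['}']), ih ([] ++ s ++ ['}'])]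
      simp
    · simp

theorem rfind_go_spec (s sub : List Char) (j : Nat) :
    (PySem.Chars.rfind.go s sub j = -1 ∧ ∀ i ≤ j, ¬ sub <+: s.drop i) ∨
    (∃ i : Nat, i ≤ j ∧ PySem.Chars.rfind.go s sub j = (i : Int) ∧ sub <+: s.drop i ∧
      ∀ m : Nat, i < m → m ≤ j → ¬ sub <+: s.drop m) := by
  induction j with
  | zero =>
    rw [PySem.Chars.rfind.go]
    by_cases h : List.isPrefixOf sub s = true
    · right
      refine ⟨0, le_refl _, by simp [h], by simpa [List.isPrefixOf_iff_prefix] using h, ?_⟩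
      intro m hm hm2; omega
    · left
      refine ⟨by simp [h], ?_⟩
      intro i hi
      interval_cases i
      simpa [List.isPrefixOf_iff_prefix] using h
  | succ j ih =>
    rw [PySem.Chars.rfind.go]
    by_cases h : sub.isPrefixOf (List.drop (j+1) s) = true
    · right
      refine ⟨j+1, le_refl _, by simp [h], by simpa [List.isPrefixOf_iff_prefix] using h, ?_⟩
      intro m hm hm2; omega
    · have hnp : ¬ sub <+: List.drop (j+1) s := by
        simpa [List.isPrefixOf_iff_prefix] using h
      rw [if_neg h]
      rcases ih with ⟨he, hall⟩ | ⟨i, hij, he, hp, hmax⟩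
      · left
        refine ⟨he, ?_⟩
        intro i hi
        rcases Nat.lt_or_ge i (j+1) with hlt | hge
        · exact hall i (by omega)
        · have : i = j + 1 := by omega
          exact this ▸ hnp
      · right
        refine ⟨i, by omega, he, hp, ?_⟩
        intro m hm hm2
        rcases Nat.lt_or_ge m (j+1) with hlt | hge
        · exact hmax m hm (by omega)
        · have : m = j + 1 := by omega
          exact this ▸ hnp

theorem brace_prefix_iff (s : List Char) (i : Nat) :
    (['}'] <+: s.drop i) ↔ s[i]? = some '}' := by
  constructor
  · intro h
    obtain ⟨t, ht⟩ := h
    have : (s.drop i)[0]? = some '}' := by rw [← ht]; rfl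
    simpa [List.getElem?_drop] using this
  · intro h
    have hi : i < s.length := (List.getElem?_eq_some_iff.mp h).1
    rw [List.drop_eq_getElem_cons hi]
    have : s[i] = '}' := by simpa [List.getElem?_eq_getElem hi] using h
    simp [this, List.prefix_iff_eq_take]

theorem mem_iff_getElem?' (s : List Char) : '}' ∈ s ↔ ∃ i : Nat, s[i]? = some '}' := by
  constructor
  · intro h
    obtain ⟨i, hi, he⟩ := List.getElem_of_mem h
    exact ⟨i, by simp [List.getElem?_eq_getElem hi, he]⟩
  · rintro ⟨i, hi⟩
    exact List.mem_of_getElem? hi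

theorem rfind_brace_spec (s : List Char) :
    (PySem.Chars.rfind s ['}'] = -1 ∧ '}' ∉ s) ∨
    (∃ i : Nat, PySem.Chars.rfind s ['}'] = (i : Int) ∧ s[i]? = some '}' ∧
      ∀ m : Nat, i < m → s[m]? ≠ some '}') := by
  rw [PySem.Chars.rfind]
  rcases rfind_go_spec s ['}'] s.length with ⟨he, hall⟩ | ⟨i, hij, he, hp, hmax⟩
  · left
    refine ⟨he, ?_⟩
    intro hmem
    obtain ⟨i, hi⟩ := (mem_iff_getElem?' s).mp hmem
    have hlt : i < s.length := (List.getElem?_eq_some_iff.mp hi).1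
    exact hall i (by omega) ((brace_prefix_iff s i).mpr hi)
  · right
    refine ⟨i, he, (brace_prefix_iff s i).mp hp, ?_⟩
    intro m hm hme
    have hlt : m < s.length := (List.getElem?_eq_some_iff.mp hme).1
    exact hmax m hm (by omega) ((brace_prefix_iff s m).mpr hme)

theorem rfind_nobrace (u : List Char) (h : '}' ∉ u) :
    PySem.Chars.rfind u ['}'] = -1 := by
  rcases rfind_brace_spec u with ⟨he, _⟩ | ⟨i, he, hget, _⟩
  · exact he
  · exact absurd (List.mem_of_getElem? hget) h

theorem getAppendBrace (a u : List Char) (k : Nat) :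
    (a ++ '}' :: u)[k]? =
      if k < a.length then a[k]? else if k = a.length then some '}' else u[k - a.length - 1]? := by
  split_ifs with h1 h2
  · exact List.getElem?_append_left h1
  · subst h2; simp
  · rw [List.getElem?_append_right (by omega)]
    have : k - a.length = (k - a.length - 1) + 1 := by omega
    rw [this]
    simp

theorem rfind_brace (a u : List Char) (ha : '}' ∉ a) :
    PySem.Chars.rfind (a ++ '}' :: u) ['}'] =
      if PySem.Chars.rfind u ['}'] = -1 then (a.length : Int)
      else (a.length : Int) + 1 + PySem.Chars.rfind u ['}'] := by
  have hself : (a ++ '}' :: u)[a.length]? = some '}' := by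
    rw [getAppendBrace]; simp
  rcases rfind_brace_spec (a ++ '}' :: u) with ⟨_, hnm⟩ | ⟨i, he, hget, hmax⟩
  · exact absurd (List.mem_of_getElem? hself) hnm
  · have hi_ge : a.length ≤ i := by
      by_contra hlt
      rw [getAppendBrace, if_pos (by omega)] at hget
      exact ha (List.mem_of_getElem? hget)
    rcases rfind_brace_spec u with ⟨heu, hnmu⟩ | ⟨iu, heu, hgetu, hmaxu⟩
    · have hi_le : i ≤ a.length := by
        by_contra hgt
        rw [getAppendBrace, if_neg (by omega), if_neg (by omega)] at hget
        exact hnmu (List.mem_of_getElem? hget)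
      rw [he, heu, if_pos rfl]
      congr 1
      omega
    · have hu_occ : (a ++ '}' :: u)[a.length + 1 + iu]? = some '}' := by
        rw [getAppendBrace, if_neg (by omega), if_neg (by omega)]
        have : a.length + 1 + iu - a.length - 1 = iu := by omega
        rw [this]; exact hgetu
      have hge : a.length + 1 + iu ≤ i := by
        by_contra hlt
        exact hmax _ (by omega) hu_occ
      have hle : i ≤ a.length + 1 + iu := by
        rcases Nat.eq_or_lt_of_le hi_ge with heq | hgt
        · omega
        · rw [getAppendBrace, if_neg (by omega), if_neg (by omega)] at hget
          by_contra hgt2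
          exact hmaxu _ (by omega) hget
      have : i = a.length + 1 + iu := by omega
      rw [he, heu, this]
      rw [if_neg (by omega)]
      push_cast
      ring

theorem find_eq_of (cs sub : List Char) (q : Nat) (hp : sub <+: cs.drop q)
    (hmin : ∀ i : Nat, i < q → ¬ sub <+: cs.drop i) :
    PySem.Chars.find cs sub = (q : Int) := by
  have hin : PySem.Chars.isIn sub cs = true :=
    (PySem.Chars.exists_prefix_drop_iff_isIn ..).mp ⟨q, hp⟩
  have hinf : sub <:+: cs := (PySem.Chars.isIn_iff_infix ..).mp hin
  have hnn : 0 ≤ PySem.Chars.find cs sub := (PySem.Chars.find_nonneg_iff ..).mpr hinf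
  obtain ⟨hspec1, hspec2⟩ := PySem.Chars.find_spec hnn
  have h1 : ¬ (PySem.Chars.find cs sub).toNat < q := fun hlt => hmin _ hlt hspec1
  have h2 : ¬ q < (PySem.Chars.find cs sub).toNat := fun hlt => hspec2 q hlt hp
  omega

def pvFn : List Char := "function".toList
theorem pvFn_len : pvFn.length = 8 := by decide
theorem pvFn_nobrace : '}' ∉ pvFn := by decide

theorem prefix_getElem? (p l : List Char) (h : p <+: l) (k : Nat) (hk : k < p.length) :
    l[k]? = some p[k] := by
  obtain ⟨t, rfl⟩ := h
  rw [List.getElem?_append_left hk, List.getElem?_eq_getElem hk]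

theorem prefix_drop_getElem? (sub l : List Char) (i : Nat) (h : sub <+: l.drop i)
    (k : Nat) (hk : k < sub.length) : l[i + k]? = some sub[k] := by
  have := prefix_getElem? sub (l.drop i) h k hk
  rwa [List.getElem?_drop] at this

theorem occ_not_cover (cs : List Char) (i k : Nat) (hk : k < 8)
    (h : pvFn <+: cs.drop i) : cs[i + k]? ≠ some '}' := by
  intro hc
  have h2 := prefix_drop_getElem? pvFn cs i h k (by rw [pvFn_len]; omega)
  rw [hc] at h2
  have h3 : pvFn[k]'(by rw [pvFn_len]; omega) = '}' := by simpa using h2.symm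
  exact pvFn_nobrace (h3 ▸ List.getElem_mem _)

-- occurrence position in a ++ '}' :: r : inside a, or strictly after the brace
theorem occ_trichotomy (a r : List Char) (i : Nat) (h : pvFn <+: (a ++ '}' :: r).drop i) :
    i + 8 ≤ a.length ∨ a.length + 1 ≤ i := by
  by_contra hc
  rw [not_or] at hc
  have hk : a.length - i < 8 := by omega
  have : (a ++ '}' :: r)[i + (a.length - i)]? = some '}' := by
    have : i + (a.length - i) = a.length := by omega
    rw [this, getAppendBrace]; simp
  exact occ_not_cover _ i _ hk h this

-- occurrence inside the prefix x of x ++ y stays inside x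
theorem occ_in_prefix (x y : List Char) (i : Nat) (h : pvFn <+: (x ++ y).drop i)
    (hi : i + 8 ≤ x.length) : pvFn <+: x.drop i := by
  have hd : (x ++ y).drop i = x.drop i ++ y := List.drop_append_of_le_length (by omega)
  rw [hd] at h
  exact (List.isPrefix_append_of_length (by rw [pvFn_len]; simp; omega)).mp h

theorem isIn_iff_occ (x : List Char) :
    PySem.Chars.isIn pvFn x = true ↔ ∃ i : Nat, i + 8 ≤ x.length ∧ pvFn <+: x.drop i := by
  constructor
  · intro h
    obtain ⟨j, hj⟩ := (PySem.Chars.exists_prefix_drop_iff_isIn pvFn x).mpr h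
    refine ⟨j, ?_, hj⟩
    have := hj.length_le
    rw [pvFn_len] at this
    simp at this
    omega
  · rintro ⟨i, _, hp⟩
    exact (PySem.Chars.exists_prefix_drop_iff_isIn pvFn x).mp ⟨i, hp⟩

theorem isIn_lift (x y : List Char) (h : x <:+: y) (hx : PySem.Chars.isIn pvFn x = true) :
    PySem.Chars.isIn pvFn y = true :=
  (PySem.Chars.isIn_iff_infix ..).mpr (((PySem.Chars.isIn_iff_infix ..).mp hx).trans h)

-- occurrences strictly after the brace correspond to occurrences in r
theorem occ_shift (a r : List Char) (k : Nat) :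
    (a ++ '}' :: r).drop (a.length + 1 + k) = r.drop k := by
  have h1 : a.length + 1 + k = a.length + (k + 1) := by omega
  rw [h1, List.drop_length_add_append, List.drop_succ_cons]

theorem find_fn_in_a (a r : List Char) (hA : PySem.Chars.isIn pvFn a = true) :
    ∃ qn : Nat, PySem.Chars.find (a ++ '}' :: r) pvFn = (qn : Int) ∧ qn + 8 ≤ a.length := by
  obtain ⟨j, hj8, hjp⟩ := (isIn_iff_occ a).mp hA
  have hocc : pvFn <+: (a ++ '}' :: r).drop j := by
    rw [List.drop_append_of_le_length (by omega)]
    exact hjp.trans (List.prefix_append _ _)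
  have hnn : 0 ≤ PySem.Chars.find (a ++ '}' :: r) pvFn :=
    (PySem.Chars.find_nonneg_iff ..).mpr
      (((PySem.Chars.exists_prefix_drop_iff_isIn ..).mp ⟨j, hocc⟩) |> (PySem.Chars.isIn_iff_infix ..).mp)
  obtain ⟨hp, hmin⟩ := PySem.Chars.find_spec hnn
  set qn := (PySem.Chars.find (a ++ '}' :: r) pvFn).toNat with hq
  have hqj : qn ≤ j := by by_contra hgt; exact hmin j (by omega) hocc
  rcases occ_trichotomy a r qn hp with hcase | hcase
  · exact ⟨qn, by omega, hcase⟩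
  · omega

theorem find_fn_after (a r : List Char) (hA : PySem.Chars.isIn pvFn a = false)
    (hR : PySem.Chars.isIn pvFn (a ++ '}' :: r) = true) :
    ∃ qr : Nat, PySem.Chars.find r pvFn = (qr : Int) ∧
      PySem.Chars.find (a ++ '}' :: r) pvFn = ((a.length + 1 + qr : Nat) : Int) ∧
      PySem.Chars.isIn pvFn r = true := by
  have hnn : 0 ≤ PySem.Chars.find (a ++ '}' :: r) pvFn :=
    (PySem.Chars.find_nonneg_iff ..).mpr ((PySem.Chars.isIn_iff_infix ..).mp hR)
  obtain ⟨hp, hmin⟩ := PySem.Chars.find_spec hnn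
  set p := (PySem.Chars.find (a ++ '}' :: r) pvFn).toNat with hpdef
  have hafter : a.length + 1 ≤ p := by
    rcases occ_trichotomy a r p hp with hcase | hcase
    · exact absurd ((isIn_iff_occ a).mpr ⟨p, hcase, occ_in_prefix a _ p hp hcase⟩) (by simp [hA])
    · exact hcase
  set qr := p - a.length - 1 with hqr
  have hshift : (a ++ '}' :: r).drop p = r.drop qr := by
    have : p = a.length + 1 + qr := by omega
    rw [this, occ_shift]
  have hoccr : pvFn <+: r.drop qr := hshift ▸ hp
  have hfr : PySem.Chars.find r pvFn = (qr : Int) := by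
    apply find_eq_of r pvFn qr hoccr
    intro i hi hip
    have : pvFn <+: (a ++ '}' :: r).drop (a.length + 1 + i) := (occ_shift a r i) ▸ hip
    exact hmin (a.length + 1 + i) (by omega) this
  refine ⟨qr, hfr, ?_, (PySem.Chars.exists_prefix_drop_iff_isIn ..).mp ⟨qr, hoccr⟩⟩
  have : a.length + 1 + qr = p := by omega
  rw [this]
  omega

theorem brace_split (rest : List Char) (h : '}' ∈ rest) :
    ∃ a r, rest = a ++ '}' :: r ∧ '}' ∉ a := by
  induction rest with
  | nil => simp at h
  | cons c t ih =>
    by_cases hc : c = '}'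
    · exact ⟨[], t, by simp [hc], by simp⟩
    · obtain ⟨a, r, heq, hna⟩ := ih (by
        rcases List.mem_cons.mp h with h1 | h1
        · exact absurd h1.symm hc
        · exact h1)
      refine ⟨c :: a, r, by simp [heq], ?_⟩
      intro hm
      rcases List.mem_cons.mp hm with h1 | h1
      · exact hc h1.symm
      · exact hna h1

theorem loopLemma (n : Nat) : ∀ rest : List Char, rest.length ≤ n →
    extractTransferLoop (pvSplit rest) [] =
      (if PySem.Chars.isIn pvFn rest = true then
        rest.take ((PySem.Chars.rfind (rest.take (PySem.Chars.find rest pvFn).toNat) ['}']) + 1).toNat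
      else rest ++ ['}']) := by
  induction n with
  | zero =>
    intro rest h
    have : rest = [] := List.eq_nil_of_length_eq_zero (by omega)
    subst this
    decide
  | succ n ih =>
    intro rest hlen
    by_cases hbr : '}' ∈ rest
    · obtain ⟨a, r, rfl, ha⟩ := brace_split rest hbr
      rw [pvSplit_brace a r ha]
      by_cases hA : PySem.Chars.isIn pvFn a = true
      · have hguard : PySem.Chars.isIn "function".toList a = true := hA
        have hR : PySem.Chars.isIn pvFn (a ++ '}' :: r) = true :=
          isIn_lift a _ (List.IsPrefix.isInfix ⟨'}' :: r, rfl⟩) hA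
        rw [if_pos hR]
        obtain ⟨qn, hfind, hq8⟩ := find_fn_in_a a r hA
        rw [hfind, Int.toNat_natCast]
        have htake : (a ++ '}' :: r).take qn = a.take qn :=
          List.take_append_of_le_length (by omega)
        rw [htake, rfind_nobrace _ (fun hm => ha (List.mem_of_mem_take hm))]
        simp only [extractTransferLoop, hguard]
        simp
      · have hguard : PySem.Chars.isIn "function".toList a = false := by
          simpa using hA
        have hloop : extractTransferLoop (a :: pvSplit r) [] =
            a ++ '}' :: extractTransferLoop (pvSplit r) [] := by
          simp only [extractTransferLoop, hguard]
          rw [loop_acc]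
          simp
        rw [hloop]
        have hrlen : r.length ≤ n := by simp at hlen; omega
        by_cases hR : PySem.Chars.isIn pvFn (a ++ '}' :: r) = true
        · rw [if_pos hR]
          obtain ⟨qr, hfr, hfrest, hRr⟩ := find_fn_after a r (by simpa using hA) hR
          rw [ih r hrlen, if_pos hRr, hfr, Int.toNat_natCast, hfrest, Int.toNat_natCast]
          have htake : (a ++ '}' :: r).take (a.length + 1 + qr) = a ++ '}' :: r.take qr := by
            have h1 : a.length + 1 + qr = a.length + (qr + 1) := by omega
            rw [h1, List.take_length_add_append, List.take_succ_cons]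
          rw [htake, rfind_brace a (r.take qr) ha]
          rcases rfind_brace_spec (r.take qr) with ⟨heq, _⟩ | ⟨i, heq, _, _⟩
          · rw [heq, if_pos rfl]
            have h1 : ((-1 : Int) + 1).toNat = 0 := by decide
            have h2 : ((a.length : Int) + 1).toNat = a.length + 1 := by omega
            rw [h1, h2, List.take_zero]
            have h3 : a.length + 1 = a.length + (0 + 1) := by omega
            rw [h3, List.take_length_add_append, List.take_succ_cons, List.take_zero]
          · rw [heq, if_neg (by omega)]
            have h1 : ((i : Int) + 1).toNat = i + 1 := by omega
            have h2 : ((a.length : Int) + 1 + i + 1).toNat = a.length + ((i + 1) + 1) := by omega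
            rw [h1, h2, List.take_length_add_append, List.take_succ_cons]
        · rw [if_neg hR]
          have hRr : PySem.Chars.isIn pvFn r = true → False := fun hh =>
            hR (isIn_lift r _ (List.IsSuffix.isInfix ⟨a ++ ['}'], by simp⟩) hh)
          rw [ih r hrlen, if_neg (by simpa using hRr)]
          simp
    · rw [pvSplit_nobrace rest hbr]
      by_cases hA : PySem.Chars.isIn pvFn rest = true
      · rw [if_pos hA]
        rw [rfind_nobrace _ (fun hm => hbr (List.mem_of_mem_take hm))]
        have hg : PySem.Chars.isIn ['f','u','n','c','t','i','o','n'] rest = true := hA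
        simp only [extractTransferLoop]
        simp [hg]
      · rw [if_neg hA]
        have hg : PySem.Chars.isIn ['f','u','n','c','t','i','o','n'] rest = false := by
          simpa using hA
        simp only [extractTransferLoop]
        simp [hg]

theorem find_brace_eq (a r : List Char) (ha : '}' ∉ a) :
    PySem.Chars.find (a ++ '}' :: r) ['}'] = (a.length : Int) := by
  apply find_eq_of
  · rw [brace_prefix_iff, getAppendBrace]
    simp
  · intro i hi
    rw [brace_prefix_iff, getAppendBrace, if_pos hi]
    intro hm
    exact ha (List.mem_of_getElem? hm)

theorem singleton_infix_iff' (cs : List Char) : (['}'] <:+: cs) ↔ '}' ∈ cs := by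
  constructor
  · intro ⟨s, t, h⟩
    subst h
    simp
  · intro h
    obtain ⟨a, r, rfl, _⟩ := brace_split cs h
    exact ⟨a, r, by simp⟩

theorem mainChars (cs : List Char) :
    extractTransferLoop ((pvSplit cs).drop 1) (PySem.List.pyGetD (pvSplit cs) 0 [] ++ ['}']) =
      (if PySem.Chars.find cs ['}'] = -1 then cs ++ ['}']
       else if PySem.Chars.findFrom cs pvFn (PySem.Chars.find cs ['}'] + 1) none = -1 then cs ++ ['}']
       else PySem.Chars.slice cs none
         (some (PySem.Chars.rfindFrom cs ['}'] 0
           (some (PySem.Chars.findFrom cs pvFn (PySem.Chars.find cs ['}'] + 1) none)) + 1))) := by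
  by_cases hbr : '}' ∈ cs
  · obtain ⟨a, r, rfl, ha⟩ := brace_split cs hbr
    rw [pvSplit_brace a r ha]
    simp only [List.drop_succ_cons, List.drop_zero, PySem.List.pyGetD_zero_cons]
    rw [loop_acc]
    have hp0 : PySem.Chars.find (a ++ '}' :: r) ['}'] = (a.length : Int) := find_brace_eq a r ha
    simp only [hp0]
    rw [if_neg (by omega)]
    have hlen : a.length + 1 ≤ (a ++ '}' :: r).length := by simp
    have hcast : (a.length : Int) + 1 = ((a.length + 1 : Nat) : Int) := by push_cast; ring
    rw [hcast, PySem.Chars.findFrom_natCast _ _ (a.length + 1) hlen]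
    have hdrop : (a ++ '}' :: r).drop (a.length + 1) = r := by
      simp
    rw [hdrop]
    by_cases hR : PySem.Chars.isIn pvFn r = true
    · have hnn : 0 ≤ PySem.Chars.find r pvFn :=
        (PySem.Chars.find_nonneg_iff ..).mpr ((PySem.Chars.isIn_iff_infix ..).mp hR)
      have hne : ¬ PySem.Chars.find r pvFn = -1 := by omega
      rw [if_neg hne]
      set qr := (PySem.Chars.find r pvFn).toNat with hqr
      have hfr : PySem.Chars.find r pvFn = (qr : Int) := by omega
      have hq8 : qr + 8 ≤ r.length := by
        obtain ⟨j, hj8, hjp⟩ := (isIn_iff_occ r).mp hR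
        obtain ⟨hp, hmin⟩ := PySem.Chars.find_spec hnn
        have : qr ≤ j := by by_contra hgt; exact hmin j (by omega) hjp
        omega
      rw [if_neg (by omega)]
      -- evaluate rfindFrom
      have hidx : ((a.length + 1 : Nat) : Int) + PySem.Chars.find r pvFn =
          ((a.length + 1 + qr : Nat) : Int) := by rw [hfr]; push_cast; ring
      rw [hidx]
      have hcut : PySem.Chars.rfindFrom (a ++ '}' :: r) ['}'] 0 (some ((a.length + 1 + qr : Nat) : Int)) =
          PySem.Chars.rfind ((a ++ '}' :: r).take (a.length + 1 + qr)) ['}'] := by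
        rw [PySem.Chars.rfindFrom]
        have hle : ¬ ((a ++ '}' :: r).length : Int) < ((a.length + 1 + qr : Nat) : Int) := by
          simp only [List.length_append, List.length_cons]
          push_cast
          omega
        have hge : ¬ (((a.length + 1 + qr : Nat) : Int) < 0) := by omega
        have hz : ¬ ((0 : Int) < 0) := by omega
        rw [if_neg hle, if_neg hge, if_neg hz, if_neg hge]
        have h0 : (0 : Int).toNat = 0 := rfl
        have h1 : ((a.length + 1 + qr : Nat) : Int).toNat = a.length + 1 + qr := by omega
        rw [h0, h1, List.drop_zero]
        have hrne : PySem.Chars.rfind ((a ++ '}' :: r).take (a.length + 1 + qr)) ['}'] ≠ -1 := by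
          have htk : (a ++ '}' :: r).take (a.length + 1 + qr) = a ++ '}' :: r.take qr := by
            have h2 : a.length + 1 + qr = a.length + (qr + 1) := by omega
            rw [h2, List.take_length_add_append, List.take_succ_cons]
          rw [htk, rfind_brace a (r.take qr) ha]
          rcases rfind_brace_spec (r.take qr) with ⟨heq, _⟩ | ⟨i, heq, _, _⟩
          · rw [heq, if_pos rfl]; omega
          · rw [heq, if_neg (by omega)]; omega
        rw [if_neg hrne]
        omega
      rw [hcut]
      have htk : (a ++ '}' :: r).take (a.length + 1 + qr) = a ++ '}' :: r.take qr := by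
        have h2 : a.length + 1 + qr = a.length + (qr + 1) := by omega
        rw [h2, List.take_length_add_append, List.take_succ_cons]
      rw [htk, rfind_brace a (r.take qr) ha]
      rw [loopLemma r.length r (le_refl _), if_pos hR, hfr, Int.toNat_natCast]
      rcases rfind_brace_spec (r.take qr) with ⟨heq, _⟩ | ⟨i, heq, _, _⟩
      · rw [heq, if_pos rfl]
        rw [PySem.Chars.slice_eq_listSlice,
          PySem.List.slice_to (a ++ '}' :: r) (b := (a.length : Int) + 1) (by omega)]
        have h1 : ((a.length : Int) + 1).toNat = a.length + (0 + 1) := by omega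
        rw [h1, List.take_length_add_append, List.take_succ_cons, List.take_zero]
        have h2 : ((-1 : Int) + 1).toNat = 0 := rfl
        rw [h2, List.take_zero]
        simp
      · rw [heq, if_neg (by omega)]
        rw [PySem.Chars.slice_eq_listSlice,
          PySem.List.slice_to (a ++ '}' :: r) (b := (a.length : Int) + 1 + i + 1) (by omega)]
        have h1 : ((a.length : Int) + 1 + i + 1).toNat = a.length + ((i + 1) + 1) := by omega
        rw [h1, List.take_length_add_append, List.take_succ_cons]
        have h2 : ((i : Int) + 1).toNat = i + 1 := by omega
        rw [h2]
        simp
    · have hfr : PySem.Chars.find r pvFn = -1 :=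
        (PySem.Chars.find_eq_neg_one_iff ..).mpr
          ((PySem.Chars.isIn_eq_false_iff ..).mp (by simpa using hR))
      rw [if_pos hfr, if_pos rfl]
      rw [loopLemma r.length r (le_refl _), if_neg (by simp [hR])]
      simp
  · rw [pvSplit_nobrace cs hbr]
    have hf : PySem.Chars.find cs ['}'] = -1 :=
      (PySem.Chars.find_eq_neg_one_iff ..).mpr (fun h => hbr ((singleton_infix_iff' cs).mp h))
    simp only [hf, if_pos]
    simp [extractTransferLoop, PySem.List.pyGetD_zero]


theorem ports_eq (allStr : String) : extractTransfer allStr = extractTransfer_alt allStr := by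
  have hbrl : ("}".toList : List Char) = ['}'] := rfl
  have hfnl : ("function".toList : List Char) = pvFn := rfl
  have hsplit : (PySem.Chars.splitMax? allStr.toList ['}'] (-1)).getD [] =
      pvSplit allStr.toList := by
    rw [PySem.Chars.splitMax?, if_neg (by decide), Option.getD_some,
      PySem.Chars.splitOnMax, if_pos (by decide), splitOn_eq_pvSplit]
  simp only [extractTransfer, extractTransfer_alt, hsplit, hbrl, hfnl]
  rw [mainChars allStr.toList]
  split_ifs <;> rfl

-- ===== VERDICT =====
theorem extractTransfer_spec : Claim_equal_extractTransfer := by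
  intro allStr _
  unfold Spec_extractTransfer
  exact ports_eq allStr
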